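-- pv_equiv track=rewrite | github.com/KIT-IBPT/cassandra-pv-archiver-python-client | cassandra_pv_archiver/admin_client.py | _encode_uri_part_custom
-- ===== SOURCE A (Python) =====
-- def _encode_uri_part_custom(uri_part):
--     """
--     Encode the URI part in the way expected by certain API functions.
--
--     This is very similar to a regular URI encode, but encodes more characters
--     and uses the tilde instead of the percent sign for escaping.
--     :param uri_part:
--         string to be encoded.
--     :return:
--         encoded string.
--     """
--     bin_data = uri_part.encode('utf_8')
--     encoded_bin_data = bytearray()
--     for b in bin_data:
--         if (b == 0x2d or b == 0x5f or (0x30 <= b <= 0x39)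
--                 or (0x41 <= b <= 0x5a) or (0x61 <= b <= 0x7a)):
--             encoded_bin_data.append(b)
--         else:
--             # This code looks a bit strange, but effectively it converts a byte
--             # to a three byte sequence, where the first byte is the ASCII code
--             # for the tilde and the other two bytes represent a hexadecimal
--             # number (in ASCII) that represents the value of the original byte.
--             high = b // 16
--             low = b % 16
--             high_b = (0x30 + high) if high < 10 else (0x37 + high)
--             low_b = (0x30 + low) if low < 10 else (0x37 + low)
--             encoded_bin_data.append(0x7e)
--             encoded_bin_data.append(high_b)
--             encoded_bin_data.append(low_b)
--     return encoded_bin_data.decode('ascii')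
-- ===== SOURCE B (Python) =====
-- _SAFE_BYTES = frozenset(
--     b'-_0123456789ABCDEFGHIJKLMNOPQRSTUVWXYZabcdefghijklmnopqrstuvwxyz')
--
--
-- def _encode_uri_part_custom(uri_part):
--     data = uri_part.encode('utf_8')
--     n = len(data)
--     parts = []
--     i = 0
--     while i < n:
--         # copy the maximal run of safe bytes starting at i as one slice
--         j = i
--         while j < n and data[j] in _SAFE_BYTES:
--             j += 1
--         parts.append(data[i:j].decode('ascii'))
--         # then escape the single unsafe byte that ended the run (if any)
--         if j < n:
--             parts.append('~%02X' % data[j])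
--             j += 1
--         i = j
--     return ''.join(parts)
-- ===== Notes on version B (the rewrite author's own statement) =====
-- stated objective: alternative
-- what changed: Replaces A's per-byte branch-and-append loop with a run-based two-pointer scan: maximal runs of safe bytes are copied as whole slices and only the single unsafe byte ending each run is formatted as a tilde plus two uppercase hex digits, the pieces joined at the end.
import Mathlib
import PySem

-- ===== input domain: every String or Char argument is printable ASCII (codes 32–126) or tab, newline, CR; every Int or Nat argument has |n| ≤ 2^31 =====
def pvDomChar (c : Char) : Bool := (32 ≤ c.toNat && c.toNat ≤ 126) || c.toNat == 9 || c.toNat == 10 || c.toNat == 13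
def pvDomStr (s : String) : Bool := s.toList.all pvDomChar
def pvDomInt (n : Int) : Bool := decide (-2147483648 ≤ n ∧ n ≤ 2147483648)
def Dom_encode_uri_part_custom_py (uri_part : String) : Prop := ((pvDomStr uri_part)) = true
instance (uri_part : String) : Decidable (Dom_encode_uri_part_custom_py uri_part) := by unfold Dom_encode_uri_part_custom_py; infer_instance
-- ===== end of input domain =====

-- B replaces A's per-byte branch-and-append loop with a run-based scan: each maximal
-- run of safe bytes is copied as one whole slice and only the single unsafe byte
-- ending the run is hex-escaped (alternative decomposition; same O(n) cost).
-- Both ports model '.encode(utf_8)' as the list of char codes, exact on the ASCII domain.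

-- ===== PORT A =====
def encode_uri_part_custom_py (uri_part : String) : String :=
  let bin_data : List Nat := uri_part.toList.map Char.toNat
  let encoded_bin_data : List Nat :=
    bin_data.foldl (fun acc b =>
      if b == 0x2d || b == 0x5f || (0x30 ≤ b && b ≤ 0x39)
          || (0x41 ≤ b && b ≤ 0x5a) || (0x61 ≤ b && b ≤ 0x7a) then
        acc ++ [b]
      else
        let high := b / 16
        let low := b % 16
        let high_b := if high < 10 then 0x30 + high else 0x37 + high
        let low_b := if low < 10 then 0x30 + low else 0x37 + low
        acc ++ [0x7e, high_b, low_b]) []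
  String.mk (encoded_bin_data.map Char.ofNat)

-- ===== PORT B =====
-- the module-level frozenset _SAFE_BYTES (as its list of byte values)
def pvSafeBytes : List Nat :=
  "-_0123456789ABCDEFGHIJKLMNOPQRSTUVWXYZabcdefghijklmnopqrstuvwxyz".toList.map Char.toNat

-- the percent-format escape of one byte, exact for b < 256: a tilde then two uppercase hex digits
def pvHexEsc (b : Nat) : List Nat :=
  [0x7e,
   (fun d => if d < 10 then 0x30 + d else 0x37 + d) (b / 16),
   (fun d => if d < 10 then 0x30 + d else 0x37 + d) (b % 16)]

-- B's outer while loop: the inner "while j < n and data[j] in _SAFE_BYTES" scan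
-- yields the maximal safe run (takeWhile) and the remainder (dropWhile); if a byte
-- remains it is the unsafe byte that ended the run: escape it and continue after it.
def pvRunScan (data : List Nat) : List Nat :=
  let run := data.takeWhile (fun b => pvSafeBytes.contains b)
  let rest := data.dropWhile (fun b => pvSafeBytes.contains b)
  match h : rest with
  | [] => run
  | b :: tail => run ++ pvHexEsc b ++ pvRunScan tail
termination_by data.length
decreasing_by
  have : rest.length ≤ data.length := by
    simpa [rest] using List.length_dropWhile_le (p := fun b => pvSafeBytes.contains b) (l := data)
  simp [h] at this; omega

def encode_uri_part_custom_py_alt (uri_part : String) : String :=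
  String.mk ((pvRunScan (uri_part.toList.map Char.toNat)).map Char.ofNat)

-- ===== PRECONDITION & SPEC =====
def Spec_encode_uri_part_custom_py (uri_part : String) (out : String) : Prop := out = encode_uri_part_custom_py_alt uri_part
instance (uri_part : String) (out : String) : Decidable (Spec_encode_uri_part_custom_py uri_part out) := by unfold Spec_encode_uri_part_custom_py; infer_instance

-- ===== CLAIM (what is proved, stated in full; the proofs are below) =====
def Claim_equal_encode_uri_part_custom_py : Prop := ∀ (uri_part : String), Dom_encode_uri_part_custom_py uri_part → Spec_encode_uri_part_custom_py uri_part (encode_uri_part_custom_py uri_part)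

-- ===== LEMMAS AND PROOFS =====

-- what B emits for one byte
def pvChunk (b : Nat) : List Nat := if pvSafeBytes.contains b then [b] else pvHexEsc b

-- what A emits for one byte
def pvEncOne (b : Nat) : List Nat :=
  if b == 0x2d || b == 0x5f || (0x30 ≤ b && b ≤ 0x39)
      || (0x41 ≤ b && b ≤ 0x5a) || (0x61 ≤ b && b ≤ 0x7a) then
    [b]
  else pvHexEsc b

theorem pvRunScan_eq_flatMap (data : List Nat) :
    pvRunScan data = data.flatMap pvChunk := by
  fun_induction pvRunScan data with
  | case1 data run rest h =>
    have h' : List.dropWhile (fun b => pvSafeBytes.contains b) data = [] := h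
    have hall : ∀ x ∈ data, pvSafeBytes.contains x = true :=
      fun x hx => List.dropWhile_eq_nil_iff.mp h' x hx
    show List.takeWhile (fun b => pvSafeBytes.contains b) data = _
    rw [List.flatMap_congr (g := fun a => [a])
      (fun x hx => by simp only [pvChunk, hall x hx, if_true])]
    rw [List.takeWhile_eq_self_iff.mpr hall]
    simp
  | case2 data run rest b tail h ih =>
    have h' : List.dropWhile (fun x => pvSafeBytes.contains x) data = b :: tail := h
    have hb : pvSafeBytes.contains b = false := by
      have h0 : 0 < (List.dropWhile (fun x => pvSafeBytes.contains x) data).length := by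
        rw [h']; simp
      have hz := List.dropWhile_get_zero_not (p := fun x => pvSafeBytes.contains x) data h0
      simp only [List.get_eq_getElem, h', List.getElem_cons_zero] at hz
      exact Bool.eq_false_iff.mpr hz
    have hsplit : List.takeWhile (fun x => pvSafeBytes.contains x) data ++ (b :: tail) = data := by
      conv_rhs => rw [← List.takeWhile_append_dropWhile
        (p := fun x => pvSafeBytes.contains x) (l := data)]
      rw [h']
    have hrun : (List.takeWhile (fun x => pvSafeBytes.contains x) data).flatMap pvChunk
        = List.takeWhile (fun x => pvSafeBytes.contains x) data := by
      rw [List.flatMap_congr (g := fun a => [a])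
        (fun x hx => by
          have hm := List.mem_takeWhile_imp hx
          simp only [pvChunk, hm, if_true])]
      simp
    show List.takeWhile (fun x => pvSafeBytes.contains x) data ++ pvHexEsc b ++ pvRunScan tail = _
    conv_rhs => rw [← hsplit]
    rw [List.flatMap_append, List.flatMap_cons, hrun, ih]
    simp only [pvChunk, hb, Bool.false_eq_true, if_false, List.append_assoc]

set_option maxRecDepth 16384 in
theorem pvEncOne_eq_chunk : ∀ b : Nat, b < 128 → pvEncOne b = pvChunk b := by
  decide

theorem encode_uri_part_custom_py_spec : Claim_equal_encode_uri_part_custom_py := by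
  intro s hdom
  unfold Spec_encode_uri_part_custom_py encode_uri_part_custom_py encode_uri_part_custom_py_alt
  simp only
  congr 1
  rw [pvRunScan_eq_flatMap]
  have hstep : (s.toList.map Char.toNat).foldl (fun acc b =>
      if b == 0x2d || b == 0x5f || (0x30 ≤ b && b ≤ 0x39)
          || (0x41 ≤ b && b ≤ 0x5a) || (0x61 ≤ b && b ≤ 0x7a) then
        acc ++ [b]
      else
        let high := b / 16
        let low := b % 16
        let high_b := if high < 10 then 0x30 + high else 0x37 + high
        let low_b := if low < 10 then 0x30 + low else 0x37 + low
        acc ++ [0x7e, high_b, low_b]) [] =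
      (s.toList.map Char.toNat).foldl (fun acc b => acc ++ pvEncOne b) [] := by
    apply PySem.List.foldl_congr_mem
    intro acc b _
    unfold pvEncOne pvHexEsc
    split <;> rfl
  rw [hstep, PySem.List.foldl_append_eq_flatMap]
  simp only [List.nil_append]
  congr 1
  apply List.flatMap_congr
  intro b hb
  apply pvEncOne_eq_chunk
  unfold Dom_encode_uri_part_custom_py pvDomStr at hdom
  rw [List.all_eq_true] at hdom
  obtain ⟨c, hc, rfl⟩ := List.mem_map.mp hb
  have := hdom c hc
  unfold pvDomChar at this
  simp only [Bool.or_eq_true, Bool.and_eq_true, decide_eq_true_eq, beq_iff_eq] at this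
  omega
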